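-- pv_equiv track=rewrite | github.com/Wellan76/code-de-vigen-re | Projet_info_n1.py | IC12
-- ===== SOURCE A (Python) =====
-- def IC12(a:int):
--     str = ""
--     sous_chaine = []
--     for j in range(0,12):
--         for i in range(j,len(a),12):
--             str = str + a[i]
--         sous_chaine.append(str)
--         str = ""
--     return sous_chaine
-- ===== SOURCE B (Python) =====
-- def IC12(a):
--     sous_chaine = [""] * 12
--     for i, c in enumerate(a):
--         sous_chaine[i % 12] += c
--     return sous_chaine
-- ===== Notes on version B (the rewrite author's own statement) =====
-- stated objective: simpler
-- what changed: Replaces the 12 strided passes over the string (one inner loop per residue class) with a single linear pass using enumerate that appends each character to bucket i % 12.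
import Mathlib
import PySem

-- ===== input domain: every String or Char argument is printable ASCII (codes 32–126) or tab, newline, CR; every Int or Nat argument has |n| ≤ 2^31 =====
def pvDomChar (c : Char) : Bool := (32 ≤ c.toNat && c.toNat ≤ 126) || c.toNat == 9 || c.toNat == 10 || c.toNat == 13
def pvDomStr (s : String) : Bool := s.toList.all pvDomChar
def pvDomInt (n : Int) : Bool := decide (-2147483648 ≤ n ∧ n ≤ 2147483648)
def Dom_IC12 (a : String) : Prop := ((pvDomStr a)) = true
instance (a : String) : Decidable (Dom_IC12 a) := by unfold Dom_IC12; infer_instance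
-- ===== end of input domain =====

-- B replaces A's 12 strided passes by one linear pass bucketing each character at index i into bucket i % 12 (simpler decomposition, same cost).


-- ===== PORT A =====
-- inner loop 'for i in range(j, len(a), 12): str = str + a[i]'; the index is always in
-- range, so pyGet? always returns some and Option.toList appends exactly that character
def IC12inner (l : List Char) (j : Int) : List Char :=
  (PySem.List.pyRange j (l.length : Int) 12).foldl
    (fun cs i => cs ++ (PySem.List.pyGet? l i).toList) []

def IC12 (a : String) : List String :=
  (PySem.List.pyRange 0 12 1).foldl
    (fun sous j => sous ++ [String.mk (IC12inner a.toList j)]) []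

-- ===== PORT B =====
-- single pass: bucket (i % 12) gets character c appended (i ≥ 0, so Lean's % agrees with Python's)
def IC12step (bs : List (List Char)) (p : Int × Char) : List (List Char) :=
  bs.modify (p.1 % 12).toNat (fun cs => cs ++ [p.2])

def IC12_alt (a : String) : List String :=
  (((PySem.List.enumerate a.toList).foldl IC12step (List.replicate 12 [])).map String.mk)

-- ===== PRECONDITION & SPEC =====
def Spec_IC12 (a : String) (out : List String) : Prop := out = IC12_alt a
instance (a : String) (out : List String) : Decidable (Spec_IC12 a out) := by unfold Spec_IC12; infer_instance

-- ===== CLAIM (what is proved, stated in full; the proofs are below) =====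
def Claim_equal_IC12 : Prop := ∀ (a : String), Dom_IC12 a → Spec_IC12 a (IC12 a)

-- ===== LEMMAS AND PROOFS =====

-- for 0 ≤ j < 12: range(j, n+1, 12) = range(j, n, 12), plus n itself exactly when n % 12 = j
theorem pyRange12_succ (j n : Int) (hj0 : 0 ≤ j) (hj : j < 12) (hn : 0 ≤ n) :
    PySem.List.pyRange j (n+1) 12 = PySem.List.pyRange j n 12 ++ (if n % 12 = j then [n] else []) := by
  rw [PySem.List.pyRange_of_pos j (n+1) (by norm_num), PySem.List.pyRange_of_pos j n (by norm_num)]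
  by_cases h : n % 12 = j
  · have e1 : (if j < n+1 then ((n+1-j+12-1)/12).toNat else 0) = ((n-j)/12).toNat + 1 := by
      split_ifs <;> omega
    have e2 : (if j < n then ((n-j+12-1)/12).toNat else 0) = ((n-j)/12).toNat := by
      split_ifs <;> omega
    rw [e1, e2, List.range_succ, List.map_append]
    simp only [h, if_pos, List.map_cons, List.map_nil]
    congr 2
    omega
  · have e : (if j < n+1 then ((n+1-j+12-1)/12).toNat else 0)
        = (if j < n then ((n-j+12-1)/12).toNat else 0) := by
      split_ifs <;> omega
    rw [e]
    simp [h]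

-- appending one character at position l.length extends exactly the strided bucket l.length % 12
theorem IC12inner_append (l : List Char) (c : Char) (j : Int) (hj0 : 0 ≤ j) (hj : j < 12) :
    IC12inner (l ++ [c]) j
      = IC12inner l j ++ (if (l.length : Int) % 12 = j then [c] else []) := by
  unfold IC12inner
  have hlen : (((l ++ [c]).length : Nat) : Int) = (l.length : Int) + 1 := by
    simp [List.length_append]
  rw [hlen, pyRange12_succ j (l.length : Int) hj0 hj (by positivity), List.foldl_append]
  have hcongr : List.foldl (fun cs i => cs ++ (PySem.List.pyGet? (l ++ [c]) i).toList) []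
        (PySem.List.pyRange j (l.length : Int) 12)
      = List.foldl (fun cs i => cs ++ (PySem.List.pyGet? l i).toList) []
        (PySem.List.pyRange j (l.length : Int) 12) := by
    apply PySem.List.foldl_congr_mem
    intro acc x hx
    rw [PySem.List.mem_pyRange_iff_of_pos (by norm_num)] at hx
    have hx0 : 0 ≤ x := le_trans hj0 hx.1
    rw [PySem.List.pyGet?_of_nonneg (l ++ [c]) hx0, PySem.List.pyGet?_of_nonneg l hx0,
      List.getElem?_append_left (by omega)]
  rw [hcongr]
  by_cases h : (l.length : Int) % 12 = j
  · simp only [h, if_pos, List.foldl_cons, List.foldl_nil]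
    rw [PySem.List.pyGet?_append_length]
    rfl
  · simp [h]

-- appending one element to the enumerated list appends one indexed pair
theorem enumerate_append_singleton {α : Type} (l : List α) (c : α) (s : Int) :
    PySem.List.enumerate (l ++ [c]) s
      = PySem.List.enumerate l s ++ [(s + (l.length : Int), c)] := by
  induction l generalizing s with
  | nil => simp [PySem.List.enumerate_nil, PySem.List.enumerate_cons]
  | cons x xs ih =>
      simp only [List.cons_append, PySem.List.enumerate_cons, ih, List.length_cons]
      have h : s + 1 + (xs.length : Int) = s + ((xs.length : Nat) + 1 : Nat) := by
        push_cast; ring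
      rw [h]

-- the single-pass state after processing l equals the 12 strided buckets of l
theorem IC12_state (l : List Char) :
    (PySem.List.enumerate l).foldl IC12step (List.replicate 12 [])
      = (List.range 12).map (fun (j : Nat) => IC12inner l (j : Int)) := by
  induction l using List.reverseRecOn with
  | nil => decide
  | append_singleton l c ih =>
      rw [enumerate_append_singleton, List.foldl_append, ih]
      simp only [List.foldl_cons, List.foldl_nil]
      unfold IC12step
      simp only [zero_add]
      apply List.ext_getElem
      · simp [List.length_modify]
      · intro k h1 h2
        have hk : k < 12 := by simpa [List.length_modify] using h1
        rw [List.getElem_modify]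
        simp only [List.getElem_map, List.getElem_range]
        rw [IC12inner_append l c (k : Int) (by positivity) (by exact_mod_cast hk)]
        have hbij : ((l.length : Int) % 12).toNat = k ↔ (l.length : Int) % 12 = (k : Int) := by
          omega
        by_cases hcase : (l.length : Int) % 12 = (k : Int)
        · rw [if_pos (hbij.mpr hcase), if_pos hcase]
        · rw [if_neg (fun h => hcase (hbij.mp h)), if_neg hcase]
          simp

-- ===== VERDICT (by name: the statement is the Claim_ definition above) =====
theorem IC12_spec : Claim_equal_IC12 := by
  intro a _
  show IC12 a = IC12_alt a
  unfold IC12 IC12_alt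
  rw [IC12_state, PySem.List.foldl_append_singleton_eq_map, List.map_map,
    PySem.List.pyRange_one]
  rfl
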